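-- pv_equiv track=rewrite | github.com/vinchinzu/euler | python/927.py | is_composite_in_S
-- ===== SOURCE A (Python) =====
-- def get_prime_factors(n):
--     factors = set()
--     d = 2
--     temp = n
--     while d * d <= temp:
--         if temp % d == 0:
--             factors.add(d)
--             while temp % d == 0:
--                 temp //= d
--         d += 1
--     if temp > 1:
--         factors.add(temp)
--     return factors
--
-- def check_reachability_py(m, exponent):
--     """
--     Checks if 0 is reachable in the sequence x_0=1, x_{k+1} = 1 + x_k^exponent mod m.
--     """
--     seen = set()
--     x = 1
--     while x not in seen:
--         if x == 0: return True
--         seen.add(x)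
--         x = (1 + pow(x, exponent, m)) % m
--         if x == 0: return True
--     return False
--
-- def is_composite_in_S(m):
--     """
--     Checks if a composite m is in S.
--     Condition: For all prime factors p of phi(m), the map x -> 1+x^p mod m reaches 0.
--     """
--     factors_m = get_prime_factors(m)
--     factors_phi = set()
--     for p in factors_m:
--         factors_phi.update(get_prime_factors(p - 1))
--         if m % (p*p) == 0:
--             factors_phi.add(p)
--
--     if 2 in factors_phi:
--         if not check_reachability_py(m, 2):
--             return False
--         factors_phi.remove(2)
--
--     for p in factors_phi:
--         if not check_reachability_py(m, p):
--             return False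
--     return True
-- ===== SOURCE B (Python) =====
-- def _prime_factors(n):
--     ps = []
--     d = 2
--     while d * d <= n:
--         if n % d == 0:
--             ps.append(d)
--             while n % d == 0:
--                 n //= d
--         d += 1
--     if n > 1:
--         ps.append(n)
--     return ps
--
--
-- def _reaches_zero(m, e):
--     # Floyd's tortoise-and-hare instead of a growing `seen` set: detect the
--     # cycle of x -> (1 + x**e) % m with two pointers (O(1) space), then walk
--     # the found cycle once more looking for 0.
--     x = y = 1
--     while True:
--         if x == 0:
--             return True
--         x = (1 + pow(x, e, m)) % m
--         y = (1 + pow(y, e, m)) % m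
--         y = (1 + pow(y, e, m)) % m
--         if x == y:
--             break
--     v = x
--     while True:
--         if v == 0:
--             return True
--         v = (1 + pow(v, e, m)) % m
--         if v == x:
--             return False
--
--
-- def is_composite_in_S(m):
--     exps = set()
--     for p in _prime_factors(m):
--         exps.update(_prime_factors(p - 1))
--         if m % (p * p) == 0:
--             exps.add(p)
--     return all(_reaches_zero(m, e) for e in exps)
-- ===== Notes on version B (the rewrite author's own statement) =====
-- stated objective: alternative
-- what changed: The reachability check replaces A's growing `seen` set (membership test per step, O(cycle) space) by Floyd's two-pointer tortoise-and-hare cycle detection followed by one walk around the found cycle looking for 0, in O(1) space; the main function also drops A's redundant special-casing of exponent 2 and is a single all(...) over the exponent set.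
import Mathlib
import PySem

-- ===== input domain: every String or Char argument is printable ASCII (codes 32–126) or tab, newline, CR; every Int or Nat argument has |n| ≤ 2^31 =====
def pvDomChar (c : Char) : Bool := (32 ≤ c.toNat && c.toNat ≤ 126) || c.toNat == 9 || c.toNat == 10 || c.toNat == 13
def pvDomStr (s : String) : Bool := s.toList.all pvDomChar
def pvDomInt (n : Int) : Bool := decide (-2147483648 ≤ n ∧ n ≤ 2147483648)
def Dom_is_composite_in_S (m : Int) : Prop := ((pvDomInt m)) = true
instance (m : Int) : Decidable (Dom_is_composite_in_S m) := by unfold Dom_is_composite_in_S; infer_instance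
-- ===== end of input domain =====

-- B replaces A's seen-set cycle detection in the reachability check by Floyd's
-- two-pointer tortoise-and-hare (plus one walk around the found cycle), O(1)
-- space, and drops the redundant exponent-2 special case (alternative; not faster).

-- ===== PORT A =====

-- inner `while temp % d == 0: temp //= d` (the same line occurs in both Pythons;
-- fuel |temp| bounds the number of divisions, each divides temp by d ≥ 2)
def pvDivOut : Nat → Int → Int → Int
  | 0, temp, _ => temp
  | f + 1, temp, d =>
    if PySem.Int.mod temp d = 0 then pvDivOut f (PySem.Int.floordiv temp d) d else temp

-- get_prime_factors(n): trial division, collecting the prime factors into a set;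
-- fuel |n|+2 covers every increment of d (d*d ≤ temp ≤ |n| forces d ≤ |n|)
def getPrimeFactorsGo : Nat → Int → Int → PySem.Set Int → PySem.Set Int
  | 0, _, _, factors => factors
  | f + 1, d, temp, factors =>
    if d * d ≤ temp then
      if PySem.Int.mod temp d = 0 then
        getPrimeFactorsGo f (d + 1) (pvDivOut temp.natAbs temp d) (PySem.Set.add factors d)
      else
        getPrimeFactorsGo f (d + 1) temp factors
    else if 1 < temp then PySem.Set.add factors temp else factors

def getPrimeFactors (n : Int) : PySem.Set Int :=
  getPrimeFactorsGo (n.natAbs + 2) 2 n PySem.Set.empty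

-- check_reachability_py: the while-loop over the growing `seen` set; fuel |m|+2 is
-- one more than the seen set (distinct residues of m, plus x_0 = 1) can ever hold
def checkReachGo (m e : Int) : Nat → PySem.Set Int → Int → Bool
  | 0, _, _ => false
  | f + 1, seen, x =>
    if PySem.Set.contains seen x then false
    else if x = 0 then true
    else
      let seen' := PySem.Set.add seen x
      let x' := PySem.Int.mod (1 + PySem.Int.powMod x e.toNat m) m
      if x' = 0 then true else checkReachGo m e f seen' x'

def checkReachability (m e : Int) : Bool :=
  checkReachGo m e (m.natAbs + 2) PySem.Set.empty 1

-- `for p in factors_phi: if not check_reachability_py(m, p): return False` / `return True`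
def checkAllA (m : Int) : List Int → Bool
  | [] => true
  | p :: rest => if !(checkReachability m p) then false else checkAllA m rest

def is_composite_in_S (m : Int) : Bool :=
  let factors_m := getPrimeFactors m
  let factors_phi := factors_m.foldl (fun s p =>
    let s' := PySem.Set.update s (getPrimeFactors (p - 1))
    if PySem.Int.mod m (p * p) = 0 then PySem.Set.add s' p else s') PySem.Set.empty
  if PySem.Set.contains factors_phi 2 then
    if !(checkReachability m 2) then false
    else
      -- factors_phi.remove(2): guarded by the membership test, so discard is exact
      checkAllA m (PySem.Set.discard factors_phi 2)
  else checkAllA m factors_phi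

-- ===== PORT B =====

-- _prime_factors(n): same trial division, appending to a plain list
def pfListGo : Nat → Int → Int → List Int → List Int
  | 0, _, _, ps => ps
  | f + 1, d, n, ps =>
    if d * d ≤ n then
      if PySem.Int.mod n d = 0 then
        pfListGo f (d + 1) (pvDivOut n.natAbs n d) (ps ++ [d])
      else
        pfListGo f (d + 1) n ps
    else if 1 < n then ps ++ [n] else ps

def primeFactorsList (n : Int) : List Int :=
  pfListGo (n.natAbs + 2) 2 n []

-- _reaches_zero(m, e), second loop: walk the detected cycle once, looking for 0;
-- fuel |m|+4 exceeds the cycle length (proved for the m ≥ 2 this runs on)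
def floydCycleGo (m e x0 : Int) : Nat → Int → Bool
  | 0, _ => false
  | f + 1, v =>
    if v = 0 then true
    else
      let v' := PySem.Int.mod (1 + PySem.Int.powMod v e.toNat m) m
      if v' = x0 then false else floydCycleGo m e x0 f v'

-- _reaches_zero(m, e), first loop: tortoise x (one step) and hare y (two steps)
-- until they meet; fuel |m|+2 exceeds the index of the first meeting
def floydGo (m e : Int) : Nat → Int → Int → Bool
  | 0, _, _ => false
  | f + 1, x, y =>
    if x = 0 then true
    else
      let x' := PySem.Int.mod (1 + PySem.Int.powMod x e.toNat m) m
      let y1 := PySem.Int.mod (1 + PySem.Int.powMod y e.toNat m) m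
      let y' := PySem.Int.mod (1 + PySem.Int.powMod y1 e.toNat m) m
      if x' = y' then floydCycleGo m e x' (m.natAbs + 4) x'
      else floydGo m e f x' y'

def reachesZero (m e : Int) : Bool := floydGo m e (m.natAbs + 2) 1 1

def is_composite_in_S_alt (m : Int) : Bool :=
  let exps := (primeFactorsList m).foldl (fun s p =>
    let s' := PySem.Set.update s (primeFactorsList (p - 1))
    if PySem.Int.mod m (p * p) = 0 then PySem.Set.add s' p else s') PySem.Set.empty
  exps.all (fun e => reachesZero m e)

-- ===== PRECONDITION & SPEC =====
def Spec_is_composite_in_S (m : Int) (out : Bool) : Prop := out = is_composite_in_S_alt m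
instance (m : Int) (out : Bool) : Decidable (Spec_is_composite_in_S m out) := by unfold Spec_is_composite_in_S; infer_instance

-- ===== CLAIM (what is proved, stated in full; the proofs are below) =====
def Claim_equal_is_composite_in_S : Prop := ∀ (m : Int), Dom_is_composite_in_S m → Spec_is_composite_in_S m (is_composite_in_S m)

-- ===== LEMMAS AND PROOFS =====

-- ---- factoring: A's set and B's list are the same list ----

theorem pvDivOut_spec (d : Int) (hd : 2 ≤ d) :
    ∀ (f : Nat) (temp : Int), 0 < temp → temp.natAbs ≤ f →
      0 < pvDivOut f temp d ∧ pvDivOut f temp d ∣ temp ∧ ¬ d ∣ pvDivOut f temp d := by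
  intro f
  induction f with
  | zero => intro temp ht hf; omega
  | succ f ih =>
    intro temp ht hf
    by_cases h : PySem.Int.mod temp d = 0
    · have hdvd : d ∣ temp := (PySem.Int.mod_eq_zero_iff_dvd temp d).mp h
      obtain ⟨k, hk⟩ := hdvd
      have hkpos : 0 < k := by nlinarith
      have hklt : k < temp := by nlinarith
      have hfl : PySem.Int.floordiv temp d = k := by
        rw [PySem.Int.floordiv_eq_ediv_of_pos (by omega : (0:Int) < d), hk,
          Int.mul_ediv_cancel_left k (by omega : d ≠ 0)]
      obtain ⟨h1, h2, h3⟩ := ih k hkpos (by omega)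
      refine ⟨?_, ?_, ?_⟩ <;> simp only [pvDivOut, if_pos h, hfl]
      · exact h1
      · exact h2.trans ⟨d, by linarith⟩
      · exact h3
    · simp only [pvDivOut, if_neg h]
      exact ⟨ht, dvd_refl temp,
        fun hc => h ((PySem.Int.mod_eq_zero_iff_dvd temp d).mpr hc)⟩

theorem pv_contains_iff (s : PySem.Set Int) (y : Int) :
    PySem.Set.contains s y = true ↔ y ∈ s := by
  simp [PySem.Set.contains]

theorem pv_add_of_not_mem (s : PySem.Set Int) (x : Int) (hx : x ∉ s) :
    PySem.Set.add s x = s ++ [x] := by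
  simp only [PySem.Set.add]
  rw [if_neg (fun hc => hx ((pv_contains_iff s x).mp hc))]

theorem gpf_eq_pf_go :
    ∀ (f : Nat) (d temp : Int) (l : List Int), 2 ≤ d → (∀ y ∈ l, ¬ y ∣ temp) →
      getPrimeFactorsGo f d temp l = pfListGo f d temp l := by
  intro f
  induction f with
  | zero => intro d temp l _ _; rfl
  | succ f ih =>
    intro d temp l hd hl
    by_cases hg : d * d ≤ temp
    · by_cases hm : PySem.Int.mod temp d = 0
      · have hdvd : d ∣ temp := (PySem.Int.mod_eq_zero_iff_dvd temp d).mp hm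
        have htpos : (0:Int) < temp := by nlinarith
        have hnm : d ∉ l := fun hmem => hl d hmem hdvd
        obtain ⟨hp, hdv, hnd⟩ := pvDivOut_spec d hd temp.natAbs temp htpos le_rfl
        simp only [getPrimeFactorsGo, pfListGo, if_pos hg, if_pos hm,
          pv_add_of_not_mem l d hnm]
        refine ih (d + 1) _ (l ++ [d]) (by omega) ?_
        intro y hy
        rcases List.mem_append.mp hy with h1 | h2
        · exact fun hc => hl y h1 (hc.trans hdv)
        · simp only [List.mem_singleton] at h2; subst h2; exact hnd
      · simp only [getPrimeFactorsGo, pfListGo, if_pos hg, if_neg hm]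
        exact ih (d + 1) temp l (by omega) hl
    · by_cases h1 : (1:Int) < temp
      · have hnm : temp ∉ l := fun hmem => hl temp hmem (dvd_refl temp)
        simp only [getPrimeFactorsGo, pfListGo, if_neg hg, if_pos h1,
          pv_add_of_not_mem l temp hnm]
      · simp only [getPrimeFactorsGo, pfListGo, if_neg hg, if_neg h1]

theorem gpf_eq_pf (n : Int) : getPrimeFactors n = primeFactorsList n := by
  unfold getPrimeFactors primeFactorsList
  exact gpf_eq_pf_go (n.natAbs + 2) 2 n [] le_rfl (by simp)

theorem pf_nil_of_le_one (n : Int) (h : n ≤ 1) : primeFactorsList n = [] := by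
  show pfListGo (n.natAbs + 1 + 1) 2 n [] = []
  rw [pfListGo, if_neg (by omega : ¬ (2:Int) * 2 ≤ n), if_neg (by omega : ¬ (1:Int) < n)]

-- ---- the iterated map x ↦ (1 + pow(x, e, m)) % m ----

def pvTraj (m e : Int) : Nat → Int
  | 0 => 1
  | k + 1 => PySem.Int.mod (1 + PySem.Int.powMod (pvTraj m e k) e.toNat m) m

theorem pvTraj_range (m e : Int) (hm : 2 ≤ m) (k : Nat) :
    0 ≤ pvTraj m e k ∧ pvTraj m e k < m := by
  cases k with
  | zero => simp [pvTraj]; omega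
  | succ k =>
    exact ⟨PySem.Int.mod_nonneg _ (by omega), PySem.Int.mod_lt _ (by omega)⟩

theorem pvTraj_card (m e : Int) (hm : 2 ≤ m) (j : Nat)
    (hinj : ∀ i1 < j, ∀ i2 < j, pvTraj m e i1 = pvTraj m e i2 → i1 = i2) :
    j ≤ m.toNat := by
  have hmap : Set.MapsTo (pvTraj m e) ↑(Finset.range j) ↑(Finset.Ico (0:Int) m) := by
    intro i _
    simp only [Finset.coe_Ico, Set.mem_Ico]
    exact pvTraj_range m e hm i
  have hinj' : Set.InjOn (pvTraj m e) ↑(Finset.range j) := by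
    intro a ha b hb hab
    simp only [Finset.coe_range, Set.mem_Iio] at ha hb
    exact hinj a ha b hb hab
  have := Finset.card_le_card_of_injOn (pvTraj m e) hmap hinj'
  simpa [Int.card_Ico] using this

theorem pvTraj_shift (m e : Int) (a b : Nat) (h : pvTraj m e a = pvTraj m e b) :
    ∀ d : Nat, pvTraj m e (a + d) = pvTraj m e (b + d) := by
  intro d
  induction d with
  | zero => simpa using h
  | succ d ih =>
    rw [show a + (d + 1) = (a + d) + 1 by omega, show b + (d + 1) = (b + d) + 1 by omega]
    simp only [pvTraj, ih]

theorem pvTraj_no_zero (m e : Int) (i j : Nat) (hij : i < j)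
    (hcyc : pvTraj m e i = pvTraj m e j) (hnz : ∀ k < j, pvTraj m e k ≠ 0) :
    ∀ k, pvTraj m e k ≠ 0 := by
  intro k
  induction k using Nat.strong_induction_on with
  | _ k ih =>
    by_cases hk : k < j
    · exact hnz k hk
    · have hs := pvTraj_shift m e j i hcyc.symm (k - j)
      have hjk : j + (k - j) = k := by omega
      rw [hjk] at hs
      rw [hs]
      exact ih (i + (k - j)) (by omega)

-- ---- A's reachability loop decides "0 occurs somewhere in the trajectory" ----

theorem checkReachGo_spec (m e : Int) (hm : 2 ≤ m) :
    ∀ (f j : Nat) (seen : PySem.Set Int),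
      f + j = m.toNat + 2 →
      (∀ y, PySem.Set.contains seen y = true ↔ ∃ i < j, pvTraj m e i = y) →
      (∀ i < j, pvTraj m e i ≠ 0) →
      (∀ i1 < j, ∀ i2 < j, pvTraj m e i1 = pvTraj m e i2 → i1 = i2) →
      (checkReachGo m e f seen (pvTraj m e j) = true ↔ ∃ k, pvTraj m e k = 0) := by
  intro f
  induction f with
  | zero =>
    intro j seen hf _ _ hinj
    exfalso
    have := pvTraj_card m e hm j hinj
    omega
  | succ f ih =>
    intro j seen hf hseen hnz hinj
    by_cases hc : PySem.Set.contains seen (pvTraj m e j) = true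
    · obtain ⟨i, hij, hti⟩ := (hseen _).mp hc
      have hall := pvTraj_no_zero m e i j hij hti hnz
      simp only [checkReachGo, if_pos hc]
      constructor
      · intro h; exact absurd h (by simp)
      · rintro ⟨k, hk⟩; exact absurd hk (hall k)
    · rw [Bool.not_eq_true] at hc
      by_cases hz : pvTraj m e j = 0
      · simp only [checkReachGo, hc, Bool.false_eq_true, if_false, if_pos hz]
        exact ⟨fun _ => ⟨j, hz⟩, fun _ => by trivial⟩
      · have hx' : PySem.Int.mod (1 + PySem.Int.powMod (pvTraj m e j) e.toNat m) m
            = pvTraj m e (j + 1) := rfl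
        by_cases hz' : pvTraj m e (j + 1) = 0
        · simp only [checkReachGo, hc, Bool.false_eq_true, if_false, if_neg hz, hx',
            if_pos hz']
          exact ⟨fun _ => ⟨j + 1, hz'⟩, fun _ => by trivial⟩
        · have hstep : checkReachGo m e (f + 1) seen (pvTraj m e j)
              = checkReachGo m e f (PySem.Set.add seen (pvTraj m e j)) (pvTraj m e (j + 1)) := by
            simp only [checkReachGo, hc, Bool.false_eq_true, if_false, if_neg hz, hx',
              if_neg hz']
          rw [hstep]
          refine ih (j + 1) _ (by omega) ?_ ?_ ?_
          · intro y
            rw [pv_contains_iff, PySem.Set.mem_add]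
            constructor
            · rintro (hy | hy)
              · obtain ⟨i, hi, hti⟩ := (hseen y).mp ((pv_contains_iff seen y).mpr hy)
                exact ⟨i, by omega, hti⟩
              · exact ⟨j, by omega, hy.symm⟩
            · rintro ⟨i, hi, hti⟩
              by_cases hij : i < j
              · exact Or.inl ((pv_contains_iff seen y).mp ((hseen y).mpr ⟨i, hij, hti⟩))
              · have : i = j := by omega
                subst this; exact Or.inr hti.symm
          · intro i hi
            by_cases hij : i < j
            · exact hnz i hij
            · have : i = j := by omega
              subst this; exact hz
          · intro i1 h1 i2 h2 heq
            by_cases h1' : i1 < j <;> by_cases h2' : i2 < j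
            · exact hinj i1 h1' i2 h2' heq
            · have : i2 = j := by omega
              subst this
              exact absurd ((hseen _).mpr ⟨i1, h1', heq⟩) (Bool.eq_false_iff.mp hc)
            · have : i1 = j := by omega
              subst this
              exact absurd ((hseen _).mpr ⟨i2, h2', heq.symm⟩) (Bool.eq_false_iff.mp hc)
            · omega

theorem checkReachability_spec (m e : Int) (hm : 2 ≤ m) :
    checkReachability m e = true ↔ ∃ k, pvTraj m e k = 0 := by
  unfold checkReachability
  rw [show (1:Int) = pvTraj m e 0 from rfl]
  exact checkReachGo_spec m e hm (m.natAbs + 2) 0 PySem.Set.empty (by omega)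
    (by intro y; simp [PySem.Set.contains, PySem.Set.empty])
    (by intro i hi; omega)
    (by intro i1 h1; omega)

-- ---- B's Floyd loops decide the same ----

theorem pvTraj_period (m e : Int) (a lam : Nat)
    (h : pvTraj m e (a + lam) = pvTraj m e a) :
    ∀ j, a ≤ j → ∀ c : Nat, pvTraj m e (j + c * lam) = pvTraj m e j := by
  have hone : ∀ j, a ≤ j → pvTraj m e (j + lam) = pvTraj m e j := by
    intro j hj
    have := pvTraj_shift m e (a + lam) a h (j - a)
    rw [show a + lam + (j - a) = j + lam by omega, show a + (j - a) = j by omega] at this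
    exact this
  intro j hj c
  induction c with
  | zero => simp
  | succ c ih =>
    rw [show j + (c + 1) * lam = (j + c * lam) + lam by ring]
    rw [hone (j + c * lam) (by omega), ih]

theorem pvTraj_exists_meet (m e : Int) (hm : 2 ≤ m) :
    ∃ k, 1 ≤ k ∧ k ≤ m.toNat ∧ pvTraj m e k = pvTraj m e (2 * k) := by
  have hninj : ¬ (∀ i1 < m.toNat + 1, ∀ i2 < m.toNat + 1,
      pvTraj m e i1 = pvTraj m e i2 → i1 = i2) := by
    intro hinj
    have := pvTraj_card m e hm (m.toNat + 1) hinj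
    omega
  push Not at hninj
  obtain ⟨i1, h1, i2, h2, heq, hne⟩ := hninj
  -- order them as i < j
  obtain ⟨i, j, hij, hj, hper0⟩ :
      ∃ i j, i < j ∧ j < m.toNat + 1 ∧ pvTraj m e (i + (j - i)) = pvTraj m e i := by
    rcases Nat.lt_or_ge i1 i2 with hlt | hge
    · exact ⟨i1, i2, hlt, h2, by rw [show i1 + (i2 - i1) = i2 by omega]; exact heq.symm⟩
    · have hlt : i2 < i1 := by omega
      exact ⟨i2, i1, hlt, h1, by rw [show i2 + (i1 - i2) = i1 by omega]; exact heq⟩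
  set lam := j - i with hlam
  have hL : 1 ≤ lam := by omega
  set q := i / lam with hq
  have hqr : lam * q + i % lam = i := Nat.div_add_mod i lam
  have hrlt : i % lam < lam := Nat.mod_lt i (by omega)
  have hkey : (q + 1) * lam = lam * q + lam := by ring
  refine ⟨(q + 1) * lam, ?_, ?_, ?_⟩
  · omega
  · omega
  · have hk : i ≤ (q + 1) * lam := by omega
    have := pvTraj_period m e i lam hper0 ((q + 1) * lam) hk (q + 1)
    rw [show (q + 1) * lam + (q + 1) * lam = 2 * ((q + 1) * lam) by ring] at this
    exact this.symm

theorem floydCycleGo_spec (m e : Int) (k0 : Nat) (hk0 : 1 ≤ k0)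
    (hk0le : k0 ≤ m.toNat + 2)
    (hper : pvTraj m e (k0 + k0) = pvTraj m e k0)
    (hlow : ∀ i < k0, pvTraj m e i ≠ 0) :
    ∀ (f2 d : Nat), f2 + d = m.toNat + 4 →
      (∀ c, 1 ≤ c → c ≤ d → pvTraj m e (k0 + c) ≠ pvTraj m e k0) →
      (∀ c < d, pvTraj m e (k0 + c) ≠ 0) →
      (floydCycleGo m e (pvTraj m e k0) f2 (pvTraj m e (k0 + d)) = true
        ↔ ∃ z, pvTraj m e z = 0) := by
  intro f2
  induction f2 with
  | zero =>
    intro d hf hmeet _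
    exact absurd hper (hmeet k0 hk0 (by omega))
  | succ f2 ih =>
    intro d hf hmeet hzs
    by_cases hz : pvTraj m e (k0 + d) = 0
    · simp only [floydCycleGo, if_pos hz]
      exact ⟨fun _ => ⟨k0 + d, hz⟩, fun _ => by trivial⟩
    · have hv' : PySem.Int.mod (1 + PySem.Int.powMod (pvTraj m e (k0 + d)) e.toNat m) m
          = pvTraj m e (k0 + d + 1) := rfl
      by_cases hret : pvTraj m e (k0 + d + 1) = pvTraj m e k0
      · simp only [floydCycleGo, if_neg hz, hv', if_pos hret]
        have hall := pvTraj_no_zero m e k0 (k0 + d + 1) (by omega) hret.symm ?_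
        · exact ⟨fun h => absurd h (by simp), fun ⟨z, hz0⟩ => absurd hz0 (hall z)⟩
        · intro z hzlt
          by_cases hzk : z < k0
          · exact hlow z hzk
          · have : z = k0 + (z - k0) := by omega
            rw [this]
            by_cases hc : z - k0 < d
            · exact hzs _ hc
            · have : z - k0 = d := by omega
              rw [this]; exact hz
      · have hstep : floydCycleGo m e (pvTraj m e k0) (f2 + 1) (pvTraj m e (k0 + d))
            = floydCycleGo m e (pvTraj m e k0) f2 (pvTraj m e (k0 + (d + 1))) := by
          simp only [floydCycleGo, if_neg hz, hv', if_neg hret]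
          rw [show k0 + d + 1 = k0 + (d + 1) by omega]
        rw [hstep]
        refine ih (d + 1) (by omega) ?_ ?_
        · intro c hc1 hc2
          by_cases hcd : c ≤ d
          · exact hmeet c hc1 hcd
          · have : c = d + 1 := by omega
            subst this
            rw [show k0 + (d + 1) = k0 + d + 1 by omega]
            exact hret
        · intro c hc
          by_cases hcd : c < d
          · exact hzs c hcd
          · have : c = d := by omega
            subst this; exact hz

theorem floydGo_spec (m e : Int) (hm : 2 ≤ m) :
    ∀ (f k : Nat), f + k = m.toNat + 2 →
      (∀ i < k, pvTraj m e i ≠ 0) →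
      (∀ i, 1 ≤ i → i ≤ k → pvTraj m e i ≠ pvTraj m e (2 * i)) →
      (floydGo m e f (pvTraj m e k) (pvTraj m e (2 * k)) = true ↔ ∃ z, pvTraj m e z = 0) := by
  intro f
  induction f with
  | zero =>
    intro k hf _ hmeet
    obtain ⟨k', h1, h2, h3⟩ := pvTraj_exists_meet m e hm
    exact absurd h3 (hmeet k' h1 (by omega))
  | succ f ih =>
    intro k hf hnz hmeet
    by_cases hz : pvTraj m e k = 0
    · simp only [floydGo, if_pos hz]
      exact ⟨fun _ => ⟨k, hz⟩, fun _ => by trivial⟩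
    · have hx' : PySem.Int.mod (1 + PySem.Int.powMod (pvTraj m e k) e.toNat m) m
          = pvTraj m e (k + 1) := rfl
      have hy' : PySem.Int.mod (1 + PySem.Int.powMod
            (PySem.Int.mod (1 + PySem.Int.powMod (pvTraj m e (2 * k)) e.toNat m) m)
            e.toNat m) m
          = pvTraj m e (2 * (k + 1)) := by
        rw [show 2 * (k + 1) = (2 * k + 1) + 1 by omega]
        rfl
      by_cases hmt : pvTraj m e (k + 1) = pvTraj m e (2 * (k + 1))
      · simp only [floydGo, if_neg hz, hx', hy', if_pos hmt]
        have hcyc := floydCycleGo_spec m e (k + 1) (by omega) (by omega)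
          (by rw [show (k + 1) + (k + 1) = 2 * (k + 1) by omega]; exact hmt.symm)
          (by intro i hi
              by_cases hik : i < k
              · exact hnz i hik
              · have : i = k := by omega
                subst this; exact hz)
          (m.natAbs + 4) 0 (by omega) (by omega) (by omega)
        rw [show (k + 1) + 0 = k + 1 by omega] at hcyc
        exact hcyc
      · have hstep : floydGo m e (f + 1) (pvTraj m e k) (pvTraj m e (2 * k))
            = floydGo m e f (pvTraj m e (k + 1)) (pvTraj m e (2 * (k + 1))) := by
          simp only [floydGo, if_neg hz, hx', hy', if_neg hmt]
        rw [hstep]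
        refine ih (k + 1) (by omega) ?_ ?_
        · intro i hi
          by_cases hik : i < k
          · exact hnz i hik
          · have : i = k := by omega
            subst this; exact hz
        · intro i h1 h2
          by_cases hik : i ≤ k
          · exact hmeet i h1 hik
          · have : i = k + 1 := by omega
            subst this; exact hmt

theorem reach_eq_check (m e : Int) (hm : 2 ≤ m) :
    checkReachability m e = reachesZero m e := by
  rw [Bool.eq_iff_iff, checkReachability_spec m e hm]
  unfold reachesZero
  rw [show (1:Int) = pvTraj m e 0 from rfl]
  have h := floydGo_spec m e hm (m.natAbs + 2) 0 (by omega)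
    (by intro i hi; omega) (by intro i h1 h2; omega)
  rw [show 2 * 0 = 0 by omega] at h
  rw [h]

-- ---- assembling the main functions ----

theorem checkAllA_eq_all (m : Int) (l : List Int) :
    checkAllA m l = l.all (fun e => checkReachability m e) := by
  induction l with
  | nil => rfl
  | cons p rest ih =>
    simp only [checkAllA, List.all_cons, ih]
    cases checkReachability m p <;> simp

theorem all_filter_ne (p : Int → Bool) (a : Int) (hp : p a = true) :
    ∀ l : List Int, l.all p = (l.filter (fun y => !(y == a))).all p := by
  intro l
  induction l with
  | nil => rfl
  | cons b l ih =>
    by_cases hb : b = a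
    · subst hb
      simp [hp, ih]
    · simp [hb, ih]

theorem all_discard (p : Int → Bool) (l : List Int) (a : Int) (ha : a ∈ l) :
    l.all p = (p a && (PySem.Set.discard l a).all p) := by
  unfold PySem.Set.discard
  by_cases hp : p a = true
  · rw [hp, Bool.true_and]
    exact all_filter_ne p a hp l
  · have hp' : p a = false := by revert hp; cases p a <;> simp
    rw [hp', Bool.false_and, Bool.eq_false_iff]
    intro hall
    have := List.all_eq_true.mp hall a ha
    rw [hp'] at this
    exact Bool.false_ne_true this

-- ===== VERDICT (by name: the statement is the Claim_ definition above) =====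
theorem is_composite_in_S_spec : Claim_equal_is_composite_in_S := by
  intro m _
  unfold Spec_is_composite_in_S
  show is_composite_in_S m = is_composite_in_S_alt m
  unfold is_composite_in_S is_composite_in_S_alt
  simp only [gpf_eq_pf]
  set E := (primeFactorsList m).foldl (fun s p =>
    let s' := PySem.Set.update s (primeFactorsList (p - 1))
    if PySem.Int.mod m (p * p) = 0 then PySem.Set.add s' p else s') PySem.Set.empty with hE
  by_cases hnil : primeFactorsList m = []
  · rw [hnil] at hE
    simp only [List.foldl_nil] at hE
    simp [hE, PySem.Set.empty, PySem.Set.contains, checkAllA]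
  · have hm2 : 2 ≤ m := by
      by_contra hm2
      exact hnil (pf_nil_of_le_one m (by omega))
    have hre : ∀ e, checkReachability m e = reachesZero m e :=
      fun e => reach_eq_check m e hm2
    simp only [checkAllA_eq_all, hre]
    by_cases h2 : PySem.Set.contains E 2 = true
    · rw [if_pos h2]
      have hmem : (2:Int) ∈ E := (pv_contains_iff E 2).mp h2
      rw [all_discard (fun e => reachesZero m e) E 2 hmem]
      cases hr : reachesZero m 2 <;> simp
    · rw [if_neg h2]
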